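-- pv_equiv track=rewrite | github.com/rsprenkels/kattis | python/2_2/misa.py | misa
-- ===== SOURCE A (Python) =====
-- from typing import Sequence, Tuple, Set
--
-- def misa(church: Sequence[str]) -> int:
--     pairs: Set[Tuple[int, int]] = set()
--     w, h = len(church[0]), len(church)
--     for row, seats in enumerate(church):
--         for col, chair in enumerate(seats):
--             if chair == 'o':
--                 for dx, dy in [(-1, 0), (-1, 1), (0, 1), (1, 1), (1, 0), (1, -1), (0, -1), (-1, -1)]:
--                     x, y = col + dx, row + dy
--                     if x >= 0 and x < w and y >= 0 and y < h:
--                         if church[y][x] == 'o':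
--                             pairs.add(tuple(sorted([row * w + col, y * w + x])))
--     start_handshakes = len(pairs)
--     max_handshakes = start_handshakes
--     for row, seats in enumerate(church):
--         for col, chair in enumerate(seats):
--             if chair == '.':
--                 extra_handshakes = 0
--                 for dx, dy in [(-1, 0), (-1, 1), (0, 1), (1, 1), (1, 0), (1, -1), (0, -1), (-1, -1)]:
--                     x, y = col + dx, row + dy
--                     if x >= 0 and x < w and y >= 0 and y < h:
--                         if church[y][x] == 'o':
--                             extra_handshakes += 1
--                 max_handshakes = max(max_handshakes, start_handshakes + extra_handshakes)
--     return max_handshakes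
-- ===== SOURCE B (Python) =====
-- def misa(church):
--     w, h = len(church[0]), len(church)
--     dirs8 = [(-1, 0), (-1, 1), (0, 1), (1, 1), (1, 0), (1, -1), (0, -1), (-1, -1)]
--
--     def nbrs(r, c, dirs):
--         return sum(1 for dx, dy in dirs
--                    if 0 <= c + dx < w and 0 <= r + dy < h and church[r + dy][c + dx] == 'o')
--
--     # each existing handshake pair is counted exactly once via the four "forward" directions
--     base = sum(nbrs(r, c, [(0, 1), (1, 1), (1, 0), (1, -1)])
--                for r, row in enumerate(church) for c, ch in enumerate(row) if ch == 'o')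
--     best = max((nbrs(r, c, dirs8)
--                 for r, row in enumerate(church) for c, ch in enumerate(row) if ch == '.'),
--                default=0)
--     return base + best
-- ===== Notes on version B (the rewrite author's own statement) =====
-- stated objective: simpler
-- what changed: Replaces the set of sorted flat-index pairs by a direct integer count that visits each undirected adjacency once through four forward directions, and replaces the running-max loop by base + max of the extra-handshake counts over '.' cells (default 0).
-- outside the precondition, e.g. on misa(['o', 'oo']): A returns 3, B returns 1
import Mathlib
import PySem

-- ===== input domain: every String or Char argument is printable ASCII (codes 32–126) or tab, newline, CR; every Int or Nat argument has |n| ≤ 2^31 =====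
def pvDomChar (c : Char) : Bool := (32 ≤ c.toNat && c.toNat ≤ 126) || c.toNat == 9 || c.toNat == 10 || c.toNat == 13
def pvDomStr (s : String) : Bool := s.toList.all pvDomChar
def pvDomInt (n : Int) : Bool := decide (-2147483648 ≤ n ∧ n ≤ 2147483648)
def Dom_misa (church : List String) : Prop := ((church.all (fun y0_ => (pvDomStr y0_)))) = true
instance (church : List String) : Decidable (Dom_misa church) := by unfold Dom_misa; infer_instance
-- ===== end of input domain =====

-- B replaces A's set of sorted flat-index pairs by a direct count of each adjacency once
-- (four forward directions) plus a max over the '.'-cells' extra counts (objective: simpler).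

-- ===== PORT A =====
def misaDirs : List (Int × Int) := [(-1,0),(-1,1),(0,1),(1,1),(1,0),(1,-1),(0,-1),(-1,-1)]

-- church[y][x]; both indices are in range whenever A's guard passes inside Pre_
def misaCell (church : List String) (y x : Int) : Char :=
  PySem.List.pyGetD (PySem.List.pyGetD church y "").toList x ' '

def misa (church : List String) : Int :=
  let w : Int := PySem.Str.len (PySem.List.pyGetD church 0 "")
  let h : Int := (church.length : Int)
  let pairs : PySem.Set (Int × Int) :=
    (PySem.List.enumerate church).foldl (fun pairs rc =>
      (PySem.List.enumerate rc.2.toList).foldl (fun pairs cc =>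
        if cc.2 = 'o' then
          misaDirs.foldl (fun pairs d =>
            let x := cc.1 + d.1
            let y := rc.1 + d.2
            if 0 ≤ x ∧ x < w ∧ 0 ≤ y ∧ y < h then
              if misaCell church y x = 'o' then
                -- tuple(sorted([row*w+col, y*w+x])) as an ordered pair
                PySem.Set.add pairs
                  (if rc.1 * w + cc.1 ≤ y * w + x then (rc.1 * w + cc.1, y * w + x)
                   else (y * w + x, rc.1 * w + cc.1))
              else pairs
            else pairs) pairs
        else pairs) pairs) PySem.Set.empty
  let start : Int := (pairs.length : Int)
  (PySem.List.enumerate church).foldl (fun m rc =>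
    (PySem.List.enumerate rc.2.toList).foldl (fun m cc =>
      if cc.2 = '.' then
        let extra := misaDirs.foldl (fun e d =>
          let x := cc.1 + d.1
          let y := rc.1 + d.2
          if 0 ≤ x ∧ x < w ∧ 0 ≤ y ∧ y < h then
            if misaCell church y x = 'o' then e + 1 else e
          else e) (0 : Int)
        max m (start + extra)
      else m) m) start

-- ===== PORT B =====
def misaAltDirs8 : List (Int × Int) := [(-1,0),(-1,1),(0,1),(1,1),(1,0),(1,-1),(0,-1),(-1,-1)]
def misaAltDirs4 : List (Int × Int) := [(0,1),(1,1),(1,0),(1,-1)]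

-- sum(1 for dx, dy in dirs if 0 <= c+dx < w and 0 <= r+dy < h and church[r+dy][c+dx] == 'o')
def misaAltNbrs (church : List String) (w h r c : Int) (ds : List (Int × Int)) : Int :=
  ((ds.filter (fun d =>
      decide (0 ≤ c + d.1 ∧ c + d.1 < w ∧ 0 ≤ r + d.2 ∧ r + d.2 < h) &&
      (PySem.List.pyGetD (PySem.List.pyGetD church (r + d.2) "").toList (c + d.1) ' ' == 'o'))).length : Int)

def misa_alt (church : List String) : Int :=
  let w : Int := PySem.Str.len (PySem.List.pyGetD church 0 "")
  let h : Int := (church.length : Int)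
  let base : Int :=
    ((PySem.List.enumerate church).flatMap (fun rc =>
      (PySem.List.enumerate rc.2.toList).filterMap (fun cc =>
        if cc.2 = 'o' then some (misaAltNbrs church w h rc.1 cc.1 misaAltDirs4) else none))).sum
  let best : Int :=
    PySem.List.maxD ((PySem.List.enumerate church).flatMap (fun rc =>
      (PySem.List.enumerate rc.2.toList).filterMap (fun cc =>
        if cc.2 = '.' then some (misaAltNbrs church w h rc.1 cc.1 misaAltDirs8) else none)))
      (fun x => x) 0
  base + best

-- ===== PRECONDITION & SPEC =====
def misaPreDirs : List (Int × Int) := [(-1,0),(-1,1),(0,1),(1,1),(1,0),(1,-1),(0,-1),(-1,-1)]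
def misaPreRow (church : List String) (r : Nat) : List Char := (church.getD r "").toList
def misaPreW (church : List String) : Int := ((misaPreRow church 0).length : Int)

-- for each cell holding 'o' or '.' and each of the 8 in-guard neighbour slots (x, y):
-- x is inside the actual row y, and an 'o'-'o' adjacency may only start at a column below w
def misaPreCellOk (church : List String) (r c : Nat) : Bool :=
  let ch := (misaPreRow church r).getD c ' '
  !(ch == 'o' || ch == '.') ||
  misaPreDirs.all fun d =>
    let x := (c : Int) + d.1
    let y := (r : Int) + d.2
    !(decide (0 ≤ x) && decide (x < misaPreW church) && decide (0 ≤ y) &&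
      decide (y < (church.length : Int))) ||
    (decide (x < ((misaPreRow church y.toNat).length : Int)) &&
     (!(ch == 'o' && (misaPreRow church y.toNat).getD x.toNat ' ' == 'o') ||
      decide ((c : Int) < misaPreW church)))

-- Pre_ excludes the empty list and ragged inputs on which A's fixed-width (w = len(church[0])) scan
-- either reads past the end of a shorter row (IndexError) or meets an adjacent 'o'-pair whose
-- source column is not below that width, where A's flat row*w+col pair encoding miscounts.
def Pre_misa (church : List String) : Prop :=
  church ≠ [] ∧
  ∀ r : Nat, r < church.length → ∀ c : Nat, c < (misaPreRow church r).length →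
    misaPreCellOk church r c = true
instance (church : List String) : Decidable (Pre_misa church) := by unfold Pre_misa; infer_instance

def pvWitness_misa : List String := ["oo", ".o"]

def Spec_misa (church : List String) (out : Int) : Prop := out = misa_alt church
instance (church : List String) (out : Int) : Decidable (Spec_misa church out) := by unfold Spec_misa; infer_instance

-- ===== CLAIM (what is proved, stated in full; the proofs are below) =====
def Claim_equal_misa : Prop := ∀ (church : List String), Dom_misa church → Pre_misa church → Spec_misa church (misa church)

-- ===== LEMMAS AND PROOFS =====

-- the combined neighbour condition A tests with two nested ifs and B tests inside its filter
def mGB (church : List String) (w h r c : Int) (d : Int × Int) : Bool :=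
  decide (0 ≤ c + d.1 ∧ c + d.1 < w ∧ 0 ≤ r + d.2 ∧ r + d.2 < h) &&
  (misaCell church (r + d.2) (c + d.1) == 'o')

-- the sorted flat-index pair A stores for cell (r,c) and direction d
def mKey (w r c : Int) (d : Int × Int) : Int × Int :=
  if r * w + c ≤ (r + d.2) * w + (c + d.1) then (r * w + c, (r + d.2) * w + (c + d.1))
  else ((r + d.2) * w + (c + d.1), r * w + c)

def mKeysC (church : List String) (w h : Int) (ds : List (Int × Int)) (r c : Int) (ch : Char) :
    List (Int × Int) :=
  if ch = 'o' then (ds.filter (mGB church w h r c)).map (mKey w r c) else []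

-- all keys A's first pass generates (for ds = misaDirs), resp. B's forward-direction keys (ds = misaAltDirs4)
def mK (church : List String) (w h : Int) (ds : List (Int × Int)) : List (Int × Int) :=
  (PySem.List.enumerate church).flatMap (fun rc =>
    (PySem.List.enumerate rc.2.toList).flatMap (fun cc => mKeysC church w h ds rc.1 cc.1 cc.2))

-- B's list of extra-handshake counts over the '.' cells
def mE (church : List String) (w h : Int) : List Int :=
  (PySem.List.enumerate church).flatMap (fun rc =>
    (PySem.List.enumerate rc.2.toList).filterMap (fun cc =>
      if cc.2 = '.' then some (misaAltNbrs church w h rc.1 cc.1 misaAltDirs8) else none))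

lemma dirs_eq_alt8 : misaDirs = misaAltDirs8 := rfl
lemma dirs_eq_pre : misaPreDirs = misaDirs := rfl

lemma foldl_add_filter_map {D K' : Type} [BEq K'] (ds : List D) (p : D → Bool) (f : D → K')
    (s : PySem.Set K') :
    ds.foldl (fun s d => if p d then PySem.Set.add s (f d) else s) s
      = ((ds.filter p).map f).foldl PySem.Set.add s := by
  induction ds generalizing s with
  | nil => rfl
  | cons d t ih => by_cases h : p d <;> simp [h, ih]

lemma foldl_op_filterMap {C : Type} (cs : List C) (P : C → Prop) [DecidablePred P] (g : C → Int)
    (F : Int → Int → Int) (m : Int) :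
    cs.foldl (fun m cc => if P cc then F m (g cc) else m) m
      = (cs.filterMap (fun cc => if P cc then some (g cc) else none)).foldl F m := by
  induction cs generalizing m with
  | nil => rfl
  | cons c t ih => by_cases h : P c <;> simp [h, ih]

lemma sum_if_len {C K' : Type} (cs : List C) (P : C → Prop) [DecidablePred P] (F : C → List K')
    (g : C → Int) (h : ∀ cc ∈ cs, g cc = ((F cc).length : Int)) :
    (cs.filterMap (fun cc => if P cc then some (g cc) else none)).sum
      = (((cs.flatMap (fun cc => if P cc then F cc else []))).length : Int) := by
  induction cs with
  | nil => rfl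
  | cons c t ih =>
    have ht : ∀ cc ∈ t, g cc = ((F cc).length : Int) := fun cc hc => h cc (List.mem_cons_of_mem _ hc)
    by_cases hp : P c
    · simp [hp, ih ht, h c List.mem_cons_self]
    · simp [hp, ih ht]

lemma foldl_max_shift (E : List Int) (s : Int) : ∀ m : Int,
    E.foldl (fun acc e => max acc (s + e)) (s + m) = s + E.foldl max m := by
  induction E with
  | nil => intro m; rfl
  | cons e t ih =>
    intro m
    have : max (s + m) (s + e) = s + max m e := by omega
    simp only [List.foldl_cons, this, ih]

lemma foldl_max_maxD (E : List Int) (hE : ∀ e ∈ E, 0 ≤ e) :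
    E.foldl max 0 = PySem.List.maxD E (fun x => x) 0 := by
  cases E with
  | nil => rfl
  | cons x t =>
    have hx : max 0 x = x := by have := hE x (List.mem_cons_self); omega
    simp [PySem.List.maxD, PySem.List.max?_id_cons, List.foldl_cons, hx]

lemma misaAltNbrs_eq (church : List String) (w h r c : Int) (ds : List (Int × Int)) :
    misaAltNbrs church w h r c ds = ((ds.filter (mGB church w h r c)).length : Int) := by
  rfl

lemma misaAltNbrs_nonneg (church : List String) (w h r c : Int) (ds : List (Int × Int)) :
    0 ≤ misaAltNbrs church w h r c ds := by
  rw [misaAltNbrs_eq]; positivity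

-- A's first pass builds exactly the set of the 8-direction key list
lemma misa_pairs (church : List String) (w h : Int) :
    ((PySem.List.enumerate church).foldl (fun pairs rc =>
      (PySem.List.enumerate rc.2.toList).foldl (fun pairs cc =>
        if cc.2 = 'o' then
          misaDirs.foldl (fun pairs d =>
            let x := cc.1 + d.1
            let y := rc.1 + d.2
            if 0 ≤ x ∧ x < w ∧ 0 ≤ y ∧ y < h then
              if misaCell church y x = 'o' then
                PySem.Set.add pairs
                  (if rc.1 * w + cc.1 ≤ y * w + x then (rc.1 * w + cc.1, y * w + x)
                   else (y * w + x, rc.1 * w + cc.1))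
              else pairs
            else pairs) pairs
        else pairs) pairs) PySem.Set.empty : PySem.Set (Int × Int))
      = PySem.Set.ofList (mK church w h misaDirs) := by
  rw [PySem.Set.ofList_eq_foldl, mK, List.foldl_flatMap]
  apply List.foldl_ext
  intro s rc _
  rw [List.foldl_flatMap]
  apply List.foldl_ext
  intro s cc _
  rw [mKeysC]
  by_cases hc : cc.2 = 'o'
  · simp only [hc, if_true]
    rw [← foldl_add_filter_map]
    apply List.foldl_ext
    intro s d _
    simp only [mGB, mKey]
    by_cases hg : (0 ≤ cc.1 + d.1 ∧ cc.1 + d.1 < w ∧ 0 ≤ rc.1 + d.2 ∧ rc.1 + d.2 < h)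
    · by_cases hcell : misaCell church (rc.1 + d.2) (cc.1 + d.1) = 'o' <;>
        simp [hg, hcell]
    · simp [hg]
  · simp [hc]

lemma mE_nonneg (church : List String) (w h : Int) : ∀ e ∈ mE church w h, 0 ≤ e := by
  intro e he
  simp only [mE, List.mem_flatMap, List.mem_filterMap] at he
  obtain ⟨rc, _, cc, _, hcc⟩ := he
  split at hcc
  · cases hcc; exact misaAltNbrs_nonneg _ _ _ _ _ _
  · cases hcc

-- A's second pass is a running max of start + extra over the '.' cells
lemma misa_second (church : List String) (w h start : Int) :
    ((PySem.List.enumerate church).foldl (fun m rc =>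
      (PySem.List.enumerate rc.2.toList).foldl (fun m cc =>
        if cc.2 = '.' then
          let extra := misaDirs.foldl (fun e d =>
            let x := cc.1 + d.1
            let y := rc.1 + d.2
            if 0 ≤ x ∧ x < w ∧ 0 ≤ y ∧ y < h then
              if misaCell church y x = 'o' then e + 1 else e
            else e) (0 : Int)
          max m (start + extra)
        else m) m) start)
      = start + PySem.List.maxD (mE church w h) (fun x => x) 0 := by
  have h1 : start + PySem.List.maxD (mE church w h) (fun x => x) 0
      = (mE church w h).foldl (fun acc e => max acc (start + e)) start := by
    rw [← foldl_max_maxD _ (mE_nonneg church w h), ← foldl_max_shift]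
    norm_num
  rw [h1, mE, List.foldl_flatMap]
  apply List.foldl_ext
  intro m rc _
  rw [← foldl_op_filterMap (PySem.List.enumerate rc.2.toList) (fun cc => cc.2 = '.')
        (fun cc => misaAltNbrs church w h rc.1 cc.1 misaAltDirs8)
        (fun m e => max m (start + e)) m]
  apply List.foldl_ext
  intro m cc _
  by_cases hc : cc.2 = '.'
  · simp only [hc, if_true]
    have h2 : (misaDirs.foldl (fun e d =>
        let x := cc.1 + d.1
        let y := rc.1 + d.2
        if 0 ≤ x ∧ x < w ∧ 0 ≤ y ∧ y < h then
          if misaCell church y x = 'o' then e + 1 else e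
        else e) (0 : Int)) = misaAltNbrs church w h rc.1 cc.1 misaAltDirs8 := by
      rw [misaAltNbrs_eq, ← dirs_eq_alt8]
      have h3 : (misaDirs.foldl (fun e d =>
          let x := cc.1 + d.1
          let y := rc.1 + d.2
          if 0 ≤ x ∧ x < w ∧ 0 ≤ y ∧ y < h then
            if misaCell church y x = 'o' then e + 1 else e
          else e) (0 : Int))
          = misaDirs.foldl (fun e d => if mGB church w h rc.1 cc.1 d then e + 1 else e) 0 := by
        apply List.foldl_ext
        intro e d _
        simp only [mGB]
        by_cases hg : (0 ≤ cc.1 + d.1 ∧ cc.1 + d.1 < w ∧ 0 ≤ rc.1 + d.2 ∧ rc.1 + d.2 < h)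
        · by_cases hcell : misaCell church (rc.1 + d.2) (cc.1 + d.1) = 'o' <;> simp [hg, hcell]
        · simp [hg]
      rw [h3, PySem.List.foldl_count_if, List.countP_eq_length_filter]
      simp
    rw [h2]
  · simp [hc]

-- B's base is the length of the 4-direction key list
lemma misa_alt_base (church : List String) (w h : Int) :
    ((PySem.List.enumerate church).flatMap (fun rc =>
      (PySem.List.enumerate rc.2.toList).filterMap (fun cc =>
        if cc.2 = 'o' then some (misaAltNbrs church w h rc.1 cc.1 misaAltDirs4) else none))).sum
      = ((mK church w h misaAltDirs4).length : Int) := by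
  rw [mK]
  generalize PySem.List.enumerate church = L
  induction L with
  | nil => rfl
  | cons rc t ih =>
    simp only [List.flatMap_cons, List.sum_append, List.length_append, Nat.cast_add, ih]
    congr 1
    have hlen : ∀ cc ∈ PySem.List.enumerate rc.2.toList,
        misaAltNbrs church w h rc.1 cc.1 misaAltDirs4
          = (((misaAltDirs4.filter (mGB church w h rc.1 cc.1)).map (mKey w rc.1 cc.1)).length : Int) := by
      intro cc _
      rw [misaAltNbrs_eq, List.length_map]
    have h2 := sum_if_len (PySem.List.enumerate rc.2.toList) (fun cc => cc.2 = 'o')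
        (fun cc => (misaAltDirs4.filter (mGB church w h rc.1 cc.1)).map (mKey w rc.1 cc.1))
        (fun cc => misaAltNbrs church w h rc.1 cc.1 misaAltDirs4) hlen
    simpa only [mKeysC] using h2

def mEdge (church : List String) (w h : Int) (ds : List (Int × Int)) (k : Int × Int) : Prop :=
  ∃ (r c : Nat) (d : Int × Int) (hr : r < church.length) (hc : c < (church[r]).toList.length),
    d ∈ ds ∧ (church[r]).toList[c] = 'o' ∧ mGB church w h ↑r ↑c d = true ∧ k = mKey w ↑r ↑c d

lemma mem_mK (church : List String) (w h : Int) (ds : List (Int × Int)) (k : Int × Int) :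
    k ∈ mK church w h ds ↔ mEdge church w h ds k := by
  constructor
  · intro hk
    simp only [mK, List.mem_flatMap, PySem.List.mem_enumerate_iff] at hk
    obtain ⟨rc, ⟨r, hr, hrc⟩, cc, ⟨c, hc, hcc⟩, hkk⟩ := hk
    subst hrc; subst hcc
    simp only [mKeysC] at hkk
    split at hkk
    · simp only [List.mem_map, List.mem_filter] at hkk
      obtain ⟨d, ⟨hd, hgb⟩, hkey⟩ := hkk
      refine ⟨r, c, d, hr, hc, hd, ?_, ?_, ?_⟩ <;> simp_all [zero_add]
    · simp at hkk
  · intro he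
    obtain ⟨r, c, d, hr, hc, hd, hch, hgb, hkey⟩ := he
    simp only [mK, List.mem_flatMap, PySem.List.mem_enumerate_iff]
    refine ⟨((r : Int), church[r]), ⟨r, hr, by simp⟩,
      ((c : Int), church[r].toList[c]), ⟨c, hc, by simp⟩, ?_⟩
    simp only [mKeysC, hch, if_true]
    simp only [List.mem_map, List.mem_filter]
    exact ⟨d, ⟨hd, hgb⟩, hkey.symm⟩


lemma rowP (church : List String) {r : Nat} (hr : r < church.length) :
    misaPreRow church r = (church[r]).toList := by
  simp [misaPreRow, List.getD, List.getElem?_eq_getElem hr]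

lemma cell_eq_getD (church : List String) {y x : Int} (hy0 : 0 ≤ y)
    (hyh : y < (church.length : Int)) :
    misaCell church y x = PySem.List.pyGetD (misaPreRow church y.toNat) x ' ' := by
  rw [misaCell, PySem.List.pyGetD_eq_getElem church "" hy0 (by exact_mod_cast hyh),
    rowP church (by omega : y.toNat < church.length)]

lemma mGB_iff (church : List String) (w h r c : Int) (d : Int × Int) :
    mGB church w h r c d = true ↔
      ((0 ≤ c + d.1 ∧ c + d.1 < w ∧ 0 ≤ r + d.2 ∧ r + d.2 < h) ∧
        misaCell church (r + d.2) (c + d.1) = 'o') := by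
  simp [mGB, and_assoc]

lemma mKey_flip (w r c : Int) (d : Int × Int) :
    mKey w (r + d.2) (c + d.1) (-d.1, -d.2) = mKey w r c d := by
  unfold mKey
  have e1 : r + d.2 + (-d.1, -d.2).2 = r := by simp
  have e2 : c + d.1 + (-d.1, -d.2).1 = c := by simp
  rw [e1, e2]
  by_cases h1 : (r + d.2) * w + (c + d.1) ≤ r * w + c <;>
    by_cases h2 : r * w + c ≤ (r + d.2) * w + (c + d.1) <;>
    simp [h1, h2] <;> constructor <;> omega

-- what Pre_ says about one scanned cell and one in-guard direction
lemma pre_facts (church : List String) (hpre : Pre_misa church) {r c : Nat} {d : Int × Int}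
    (hr : r < church.length) (hc : c < (church[r]).toList.length)
    (hch : (church[r]).toList[c] = 'o' ∨ (church[r]).toList[c] = '.')
    (hd : d ∈ misaDirs)
    (hx0 : 0 ≤ (c : Int) + d.1) (hxw : (c : Int) + d.1 < misaPreW church)
    (hy0 : 0 ≤ (r : Int) + d.2) (hyh : (r : Int) + d.2 < (church.length : Int)) :
    (c : Int) + d.1 < ((misaPreRow church ((r : Int) + d.2).toNat).length : Int) ∧
    ((church[r]).toList[c] = 'o' →
      (misaPreRow church ((r : Int) + d.2).toNat).getD ((c : Int) + d.1).toNat ' ' = 'o' →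
      (c : Int) < misaPreW church) := by
  have hrow := rowP church hr
  have hcell := hpre.2 r hr c (by rw [hrow]; exact hc)
  rw [misaPreCellOk] at hcell
  simp only [List.all_eq_true, Bool.or_eq_true, Bool.and_eq_true, Bool.not_eq_true',
    decide_eq_true_eq, Bool.or_eq_false_iff, beq_eq_false_iff_ne] at hcell
  have hgetd : (misaPreRow church r).getD c ' ' = (church[r]).toList[c] := by
    rw [hrow, List.getD_eq_getElem _ _ (by rw [← hrow]; rw [hrow]; exact hc)]
  rcases hcell with hbad | hall
  · rw [hgetd] at hbad
    rcases hch with h | h <;> simp [h] at hbad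
  · have hspec := hall d (by rw [dirs_eq_pre]; exact hd)
    rcases hspec with hguard | ⟨hlen, hrest⟩
    · simp [hx0, hxw, hy0, hyh] at hguard
    · refine ⟨hlen, ?_⟩
      intro ho htgt
      rcases hrest with hfalse | hcw
      · exfalso
        rw [hgetd] at hfalse
        rw [List.getD] at htgt
        simp [ho, htgt] at hfalse
      · exact hcw

-- every 8-direction edge is a 4-direction edge (inside Pre_)
lemma edge_sym (church : List String) (hpre : Pre_misa church) (k : Int × Int) :
    mEdge church (misaPreW church) (church.length : Int) misaDirs k
      ↔ mEdge church (misaPreW church) (church.length : Int) misaAltDirs4 k := by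
  constructor
  · rintro ⟨r, c, d, hr, hc, hd, hch, hgb, hkey⟩
    rw [mGB_iff] at hgb
    obtain ⟨⟨hx0, hxw, hy0, hyh⟩, hcell⟩ := hgb
    by_cases hfwd : d ∈ misaAltDirs4
    · exact ⟨r, c, d, hr, hc, hfwd, hch,
        by rw [mGB_iff]; exact ⟨⟨hx0, hxw, hy0, hyh⟩, hcell⟩, hkey⟩
    · have hpf := pre_facts church hpre hr hc (Or.inl hch) hd hx0 hxw hy0 hyh
      have hr' : ((r : Int) + d.2).toNat < church.length := by omega
      have hcr : ((((r : Int) + d.2).toNat : Nat) : Int) = (r : Int) + d.2 := by omega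
      have hcc : ((((c : Int) + d.1).toNat : Nat) : Int) = (c : Int) + d.1 := by omega
      have hrowr' := rowP church hr'
      have hlen : (((c : Int) + d.1).toNat) < (church[((r : Int) + d.2).toNat]).toList.length := by
        have h1 := hpf.1
        rw [hrowr'] at h1
        omega
      have hcell' : (misaPreRow church ((r : Int) + d.2).toNat).getD
          (((c : Int) + d.1).toNat) ' ' = 'o' := by
        rw [cell_eq_getD church hy0 hyh] at hcell
        rw [PySem.List.pyGetD_eq_getElem _ ' ' hx0 (by exact_mod_cast hpf.1)] at hcell
        rw [List.getD_eq_getElem _ ' ' (by rw [hrowr']; exact hlen)]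
        exact hcell
      have hch' : (church[((r : Int) + d.2).toNat]).toList[(((c : Int) + d.1).toNat)] = 'o' := by
        have h2 := hcell'
        rw [hrowr', List.getD_eq_getElem _ ' ' hlen] at h2
        exact h2
      have hcw : (c : Int) < misaPreW church := hpf.2 hch hcell'
      have hd' : ((-d.1, -d.2) : Int × Int) ∈ misaAltDirs4 := by
        simp only [misaDirs, List.mem_cons, List.not_mem_nil, or_false] at hd
        rcases hd with rfl | rfl | rfl | rfl | rfl | rfl | rfl | rfl <;>
          first
          | exact absurd (by decide) hfwd
          | decide
      have hgb' : mGB church (misaPreW church) (church.length : Int)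
          ((((r : Int) + d.2).toNat : Nat) : Int) ((((c : Int) + d.1).toNat : Nat) : Int)
          (-d.1, -d.2) = true := by
        rw [mGB_iff]
        constructor
        · refine ⟨?_, ?_, ?_, ?_⟩ <;> simp only [] <;> omega
        · have e1 : ((((r : Int) + d.2).toNat : Nat) : Int) + (-d.1, -d.2).2 = (r : Int) := by
            simp only []
            omega
          have e2 : ((((c : Int) + d.1).toNat : Nat) : Int) + (-d.1, -d.2).1 = (c : Int) := by
            simp only []
            omega
          rw [e1, e2]
          rw [cell_eq_getD church (by positivity) (by exact_mod_cast hr)]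
          simp only [Int.toNat_natCast]
          rw [rowP church hr]
          rw [PySem.List.pyGetD_eq_getElem _ ' ' (by positivity) (by exact_mod_cast hc)]
          simpa using hch
      refine ⟨((r : Int) + d.2).toNat, ((c : Int) + d.1).toNat, (-d.1, -d.2), hr', hlen, hd',
        hch', hgb', ?_⟩
      rw [hkey, hcr, hcc]
      exact (mKey_flip (misaPreW church) (r : Int) (c : Int) d).symm
  · rintro ⟨r, c, d, hr, hc, hd, hch, hgb, hkey⟩
    refine ⟨r, c, d, hr, hc, ?_, hch, hgb, hkey⟩
    simp only [misaAltDirs4, List.mem_cons, List.not_mem_nil, or_false] at hd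
    rcases hd with rfl | rfl | rfl | rfl <;> simp [misaDirs]

lemma dirs4_sub {d : Int × Int} (hd : d ∈ misaAltDirs4) : d ∈ misaDirs := by
  simp only [misaAltDirs4, List.mem_cons, List.not_mem_nil, or_false] at hd
  rcases hd with rfl | rfl | rfl | rfl <;> simp [misaDirs]

lemma enc_inj {w a b a' b' : Int} (hb : 0 ≤ b) (hbw : b < w) (hb' : 0 ≤ b') (hbw' : b' < w)
    (h : a * w + b = a' * w + b') : a = a' ∧ b = b' := by
  have hw : (0 : Int) ≤ w := by omega
  have ha : a = a' := by
    rcases lt_trichotomy a a' with hlt | heq | hgt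
    · have h2 := mul_le_mul_of_nonneg_right (by omega : a + 1 ≤ a') hw
      nlinarith
    · exact heq
    · have h2 := mul_le_mul_of_nonneg_right (by omega : a' + 1 ≤ a) hw
      nlinarith
  subst ha
  omega

lemma mKey_cases {w r c r' c' : Int} {d d' : Int × Int}
    (h : mKey w r c d = mKey w r' c' d') :
    (r * w + c = r' * w + c' ∧ (r + d.2) * w + (c + d.1) = (r' + d'.2) * w + (c' + d'.1)) ∨
    (r * w + c = (r' + d'.2) * w + (c' + d'.1) ∧ (r + d.2) * w + (c + d.1) = r' * w + c') := by
  unfold mKey at h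
  split_ifs at h <;> injection h with h1 h2 <;>
    first
    | exact Or.inl ⟨h1, h2⟩
    | exact Or.inr ⟨h1, h2⟩
    | exact Or.inr ⟨h2, h1⟩
    | exact Or.inl ⟨h2, h1⟩

-- inside Pre_, an 'o' cell that generated a key sits at a column below w
lemma col_lt_w (church : List String) (hpre : Pre_misa church) {r c : Nat} {d : Int × Int}
    (hr : r < church.length) (hc : c < (church[r]).toList.length)
    (hch : (church[r]).toList[c] = 'o') (hd8 : d ∈ misaDirs)
    (hgb : mGB church (misaPreW church) (church.length : Int) ↑r ↑c d = true) :
    (c : Int) < misaPreW church := by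
  rw [mGB_iff] at hgb
  obtain ⟨⟨hx0, hxw, hy0, hyh⟩, hcell⟩ := hgb
  have hpf := pre_facts church hpre hr hc (Or.inl hch) hd8 hx0 hxw hy0 hyh
  apply hpf.2 hch
  rw [cell_eq_getD church hy0 hyh] at hcell
  rw [PySem.List.pyGetD_eq_getElem _ ' ' hx0 (by exact_mod_cast hpf.1)] at hcell
  rw [List.getD_eq_getElem _ ' ' (by omega)]
  exact hcell

-- a key generated with a forward direction determines its cell and direction
lemma key_inj (church : List String) (hpre : Pre_misa church) {r c r' c' : Nat} {d d' : Int × Int}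
    (hr : r < church.length) (hc : c < (church[r]).toList.length)
    (hch : (church[r]).toList[c] = 'o') (hd : d ∈ misaAltDirs4)
    (hgb : mGB church (misaPreW church) (church.length : Int) ↑r ↑c d = true)
    (hr' : r' < church.length) (hc' : c' < (church[r']).toList.length)
    (hch' : (church[r']).toList[c'] = 'o') (hd' : d' ∈ misaAltDirs4)
    (hgb' : mGB church (misaPreW church) (church.length : Int) ↑r' ↑c' d' = true)
    (hk : mKey (misaPreW church) ↑r ↑c d = mKey (misaPreW church) ↑r' ↑c' d') :
    r = r' ∧ c = c' ∧ d = d' := by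
  have hcw := col_lt_w church hpre hr hc hch (dirs4_sub hd) hgb
  have hcw' := col_lt_w church hpre hr' hc' hch' (dirs4_sub hd') hgb'
  rw [mGB_iff] at hgb hgb'
  obtain ⟨⟨hx0, hxw, hy0, hyh⟩, -⟩ := hgb
  obtain ⟨⟨hx0', hxw', hy0', hyh'⟩, -⟩ := hgb'
  rcases mKey_cases hk with ⟨h1, h2⟩ | ⟨h1, h2⟩
  · have e1 := enc_inj (by positivity) hcw (by positivity) hcw' h1
    have e2 := enc_inj hx0 hxw hx0' hxw' h2
    refine ⟨by omega, by omega, ?_⟩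
    have : d.1 = d'.1 ∧ d.2 = d'.2 := by omega
    exact Prod.ext this.1 this.2
  · have e1 := enc_inj (by positivity) hcw hx0' hxw' h1
    have e2 := enc_inj hx0 hxw (by positivity) hcw' h2
    exfalso
    simp only [misaAltDirs4, List.mem_cons, List.not_mem_nil, or_false] at hd hd'
    rcases hd with rfl | rfl | rfl | rfl <;> rcases hd' with rfl | rfl | rfl | rfl <;>
      simp_all <;> omega

lemma mem_rowK (church : List String) (w h : Int) (ds : List (Int × Int)) (i : Nat)
    (hi : i < church.length) (k : Int × Int) :
    k ∈ (PySem.List.enumerate (church[i]).toList).flatMap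
        (fun cc => mKeysC church w h ds (i : Int) cc.1 cc.2)
      ↔ ∃ (c : Nat) (hc : c < (church[i]).toList.length) (d : Int × Int),
          d ∈ ds ∧ (church[i]).toList[c] = 'o' ∧ mGB church w h ↑i ↑c d = true ∧
          k = mKey w ↑i ↑c d := by
  constructor
  · intro hk
    simp only [List.mem_flatMap, PySem.List.mem_enumerate_iff] at hk
    obtain ⟨cc, ⟨c, hc, rfl⟩, hkk⟩ := hk
    by_cases hcho : (church[i]).toList[c] = 'o'
    · simp only [mKeysC, hcho, if_true, zero_add, List.mem_map, List.mem_filter] at hkk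
      obtain ⟨d, ⟨hd, hgb⟩, hkey⟩ := hkk
      exact ⟨c, hc, d, hd, hcho, hgb, hkey.symm⟩
    · simp [mKeysC, hcho] at hkk
  · rintro ⟨c, hc, d, hd, hcho, hgb, hkey⟩
    simp only [List.mem_flatMap, PySem.List.mem_enumerate_iff]
    refine ⟨((c : Int), (church[i]).toList[c]), ⟨c, hc, by simp⟩, ?_⟩
    simp only [mKeysC, hcho, if_true, List.mem_map, List.mem_filter]
    exact ⟨d, ⟨hd, hgb⟩, hkey.symm⟩

lemma nodup_mK4 (church : List String) (hpre : Pre_misa church) :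
    (mK church (misaPreW church) (church.length : Int) misaAltDirs4).Nodup := by
  rw [mK, List.nodup_flatMap]
  constructor
  · intro rc hrc
    rw [PySem.List.mem_enumerate_iff] at hrc
    obtain ⟨i, hi, rfl⟩ := hrc
    rw [List.nodup_flatMap]
    constructor
    · intro cc hcc
      rw [PySem.List.mem_enumerate_iff] at hcc
      obtain ⟨c, hc, rfl⟩ := hcc
      rw [mKeysC]
      split
      · apply List.Nodup.map_on
        · intro d1 hd1 d2 hd2 hk12
          simp only [List.mem_filter] at hd1 hd2
          have hcho : (church[i]).toList[c] = 'o' := by assumption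
          have := key_inj church hpre hi hc hcho hd1.1
            (by simpa [zero_add] using hd1.2) hi hc hcho hd2.1
            (by simpa [zero_add] using hd2.2) (by simpa [zero_add] using hk12)
          exact this.2.2
        · exact List.Nodup.filter _ (by decide)
      · exact List.nodup_nil
    · apply (PySem.List.pairwise_lt_enumerate (church[i]).toList 0).imp_of_mem
      intro cc1 cc2 h1 h2 hlt
      rw [PySem.List.mem_enumerate_iff] at h1 h2
      obtain ⟨c1, hc1, rfl⟩ := h1
      obtain ⟨c2, hc2, rfl⟩ := h2
      intro k hk1 hk2
      by_cases ho1 : (church[i]).toList[c1] = 'o'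
      · by_cases ho2 : (church[i]).toList[c2] = 'o'
        · simp only [mKeysC, ho1, ho2, if_true, zero_add, List.mem_map, List.mem_filter] at hk1 hk2
          obtain ⟨d1, ⟨hd1, hgb1⟩, hkey1⟩ := hk1
          obtain ⟨d2, ⟨hd2, hgb2⟩, hkey2⟩ := hk2
          have := key_inj church hpre hi hc1 ho1 hd1 hgb1 hi hc2 ho2 hd2 hgb2
            (hkey1.trans hkey2.symm)
          simp only [zero_add] at hlt
          omega
        · simp [mKeysC, ho2] at hk2
      · simp [mKeysC, ho1] at hk1
  · apply (PySem.List.pairwise_lt_enumerate church 0).imp_of_mem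
    intro rc1 rc2 h1 h2 hlt
    rw [PySem.List.mem_enumerate_iff] at h1 h2
    obtain ⟨i1, hi1, rfl⟩ := h1
    obtain ⟨i2, hi2, rfl⟩ := h2
    intro k hk1 hk2
    simp only [zero_add] at hlt hk1 hk2
    rw [mem_rowK church _ _ _ i1 hi1] at hk1
    rw [mem_rowK church _ _ _ i2 hi2] at hk2
    obtain ⟨c1, hc1, d1, hd1, ho1, hgb1, hkey1⟩ := hk1
    obtain ⟨c2, hc2, d2, hd2, ho2, hgb2, hkey2⟩ := hk2
    have := key_inj church hpre hi1 hc1 ho1 hd1 hgb1 hi2 hc2 ho2 hd2 hgb2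
      (hkey1.symm.trans hkey2)
    omega

lemma start_eq_base (church : List String) (hpre : Pre_misa church) :
    ((PySem.Set.ofList (mK church (misaPreW church) (church.length : Int) misaDirs)).length : Int)
      = ((mK church (misaPreW church) (church.length : Int) misaAltDirs4).length : Int) := by
  have h1 : (PySem.Set.ofList (mK church (misaPreW church) (church.length : Int) misaDirs)).Perm
      (mK church (misaPreW church) (church.length : Int) misaAltDirs4) := by
    rw [List.perm_ext_iff_of_nodup (PySem.Set.nodup_ofList _) (nodup_mK4 church hpre)]
    intro a
    rw [PySem.Set.mem_ofList, mem_mK, mem_mK, edge_sym church hpre]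
  exact_mod_cast h1.length_eq

lemma w_eq (church : List String) :
    PySem.Str.len (PySem.List.pyGetD church 0 "") = misaPreW church := by
  simp [misaPreW, misaPreRow, PySem.List.pyGetD_zero, PySem.Str.len_eq]

-- ===== VERDICT (by name: the statement is the Claim_ definition above) =====
theorem misa_spec : Claim_equal_misa := by
  unfold Claim_equal_misa
  intro church _ hpre
  unfold Spec_misa
  rw [misa, misa_alt]
  simp only [w_eq church]
  rw [misa_pairs church (misaPreW church) (church.length : Int),
      misa_second church (misaPreW church) (church.length : Int),
      misa_alt_base church (misaPreW church) (church.length : Int)]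
  rw [start_eq_base church hpre]
  rfl
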